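-- pv_equiv track=rewrite | github.com/KNUAI/LSTF_AD | SKAB_LSTFAD2.py | detection_margine
-- ===== SOURCE A (Python) =====
-- def detection_margine(pred, margine):
--     result = []
--     tmp = []
--     for p in pred:
--         tmp.append(p)
--         if p==1:
--             pass
--         else:
--             if len(tmp)>margine:
--                 result.extend(tmp)
--             else:
--                 result.extend([0]*len(tmp))
--             tmp = []
--     result.extend(tmp)
--     return result
-- ===== SOURCE B (Python) =====
-- def detection_margine(pred, margine):
--     result = []
--     start = 0
--     for i, p in enumerate(pred):
--         if p != 1:
--             n = i + 1 - start
--             if n > margine: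
--                 result.extend(pred[start:i + 1])
--             else:
--                 result.extend([0] * n)
--             start = i + 1
--     result.extend(pred[start:])
--     return result
-- ===== Notes on version B (the rewrite author's own statement) =====
-- stated objective: alternative
-- what changed: B replaces A's element-buffer tmp (appended to and flushed on each non-1) by an index-based one-pass scan: it keeps only the integer start of the current run and emits pred[start:i+1] (or zeros of its length) directly via slicing when a run terminates, with pred[start:] passed through verbatim at the end.
import Mathlib
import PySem

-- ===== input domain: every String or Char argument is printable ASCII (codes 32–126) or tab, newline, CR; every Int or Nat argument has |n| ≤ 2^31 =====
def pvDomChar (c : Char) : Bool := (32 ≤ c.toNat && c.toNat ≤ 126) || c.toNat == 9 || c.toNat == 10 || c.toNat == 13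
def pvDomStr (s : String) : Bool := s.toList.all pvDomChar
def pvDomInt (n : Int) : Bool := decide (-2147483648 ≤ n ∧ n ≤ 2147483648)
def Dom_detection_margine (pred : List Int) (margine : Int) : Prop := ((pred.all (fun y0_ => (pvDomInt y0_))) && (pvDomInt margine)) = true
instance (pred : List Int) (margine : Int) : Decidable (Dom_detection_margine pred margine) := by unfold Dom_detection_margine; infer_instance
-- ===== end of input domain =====

-- B is an alternative one-pass re-implementation: it keeps the integer start index of the
-- current run instead of buffering the run's elements, emitting slices of pred directly.

-- ===== PORT A =====
-- loop body of A: tmp buffers the current run; a non-1 element flushes it (gated by length)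
def stepA (margine : Int) (st : List Int × List Int) (p : Int) : List Int × List Int :=
  let tmp := st.2 ++ [p]
  if p == 1 then (st.1, tmp)
  else
    if (tmp.length : Int) > margine then (st.1 ++ tmp, [])
    else (st.1 ++ List.replicate tmp.length 0, [])

def detection_margine (pred : List Int) (margine : Int) : List Int :=
  let st := pred.foldl (stepA margine) ([], [])
  st.1 ++ st.2

-- ===== PORT B =====
-- loop body of B: st = (result, start); a non-1 element at index i ends the run pred[start:i+1],
-- which is length-gated and emitted directly
def stepB (pred : List Int) (margine : Int) (st : List Int × Int) (ip : Int × Int) : List Int × Int :=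
  if ip.2 ≠ 1 then
    let n := ip.1 + 1 - st.2
    if n > margine then (st.1 ++ PySem.List.slice pred (some st.2) (some (ip.1 + 1)), ip.1 + 1)
    else (st.1 ++ List.replicate n.toNat 0, ip.1 + 1)
  else st

def detection_margine_alt (pred : List Int) (margine : Int) : List Int :=
  let st := (PySem.List.enumerate pred 0).foldl (stepB pred margine) ([], 0)
  st.1 ++ PySem.List.slice pred (some st.2) none

-- ===== PRECONDITION & SPEC =====
def Spec_detection_margine (pred : List Int) (margine : Int) (out : List Int) : Prop := out = detection_margine_alt pred margine
instance (pred : List Int) (margine : Int) (out : List Int) : Decidable (Spec_detection_margine pred margine out) := by unfold Spec_detection_margine; infer_instance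

-- ===== CLAIM (what is proved, stated in full; the proofs are below) =====
def Claim_equal_detection_margine : Prop := ∀ (pred : List Int) (margine : Int), Dom_detection_margine pred margine → Spec_detection_margine pred margine (detection_margine pred margine)

-- ===== LEMMAS AND PROOFS =====

-- simulation invariant: with rest = pred.drop k and the current run being pred[s:k],
-- A's buffered fold and B's index fold produce the same final output
lemma dm_main (pred : List Int) (m : Int) :
    ∀ (rest : List Int) (k s : Nat) (r : List Int),
      pred.drop k = rest → s ≤ k →
      (let a := rest.foldl (stepA m) (r, (pred.drop s).take (k - s)); a.1 ++ a.2)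
      = (let b := (PySem.List.enumerate rest (k : Int)).foldl (stepB pred m) (r, (s : Int));
         b.1 ++ PySem.List.slice pred (some b.2) none) := by
  intro rest
  induction rest with
  | nil =>
    intro k s r hdrop hsk
    have hk : pred.length ≤ k := by
      have := congrArg List.length hdrop
      simp at this
      omega
    have htake : (pred.drop s).take (k - s) = pred.drop s := by
      apply List.take_of_length_le
      simp
      omega
    simp [PySem.List.enumerate_nil, PySem.List.slice_from_natCast, htake]
  | cons p rest ih =>
    intro k s r hdrop hsk
    have hk : k < pred.length := by
      have := congrArg List.length hdrop
      simp at this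
      omega
    have hpk : pred[k]? = some p := by
      have h0 : (pred.drop k)[0]? = some p := by rw [hdrop]; rfl
      rwa [List.getElem?_drop, Nat.add_zero] at h0
    have hdrop' : pred.drop (k + 1) = rest := by
      have : pred.drop (k + 1) = (pred.drop k).drop 1 := by
        rw [List.drop_drop]
      rw [this, hdrop]
      rfl
    have htmp : (pred.drop s).take (k - s) ++ [p] = (pred.drop s).take (k + 1 - s) := by
      have h1 : k + 1 - s = (k - s) + 1 := by omega
      rw [h1, List.take_add_one]
      have : (pred.drop s)[k - s]? = some p := by
        rw [List.getElem?_drop]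
        have : s + (k - s) = k := by omega
        rw [this, hpk]
      rw [this]
      rfl
    have hlen : ((pred.drop s).take (k + 1 - s)).length = k + 1 - s := by
      simp
      omega
    rw [PySem.List.enumerate_cons]
    simp only [List.foldl_cons]
    have hc : ((k + 1 - s : Nat) : Int) = (k : Int) + 1 - (s : Int) := by omega
    by_cases hp : p = 1
    · subst hp
      have hA : stepA m (r, (pred.drop s).take (k - s)) 1
          = (r, (pred.drop s).take (k + 1 - s)) := by
        simp [stepA, htmp]
      have hB : stepB pred m (r, (s : Int)) ((k : Int), 1) = (r, (s : Int)) := by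
        simp [stepB]
      rw [hA, hB]
      exact ih (k + 1) s r hdrop' (by omega)
    · have hA : stepA m (r, (pred.drop s).take (k - s)) p
          = (if ((k : Int) + 1 - (s : Int)) > m
             then (r ++ (pred.drop s).take (k + 1 - s), ([] : List Int))
             else (r ++ List.replicate (k + 1 - s) 0, [])) := by
        simp only [stepA, htmp, beq_iff_eq, hp, if_false, hlen, hc]
      have hslice : PySem.List.slice pred (some (s : Int)) (some ((k : Int) + 1))
          = (pred.drop s).take (k + 1 - s) := by
        have : ((k : Int) + 1) = ((k + 1 : Nat) : Int) := by omega
        rw [this, PySem.List.slice_natCast]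
      have hB : stepB pred m (r, (s : Int)) ((k : Int), p)
          = (if ((k : Int) + 1 - (s : Int)) > m
             then (r ++ (pred.drop s).take (k + 1 - s), (k : Int) + 1)
             else (r ++ List.replicate (k + 1 - s) 0, (k : Int) + 1)) := by
        simp only [stepB, hp, ne_eq, not_false_iff, if_true, hslice]
        have hnt : ((k : Int) + 1 - (s : Int)).toNat = k + 1 - s := by omega
        rw [hnt]
      rw [hA, hB]
      by_cases hgt : ((k : Int) + 1 - (s : Int)) > m
      · rw [if_pos hgt, if_pos hgt]
        have hku : ((k : Int) + 1) = ((k + 1 : Nat) : Int) := by omega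
        rw [hku]
        have := ih (k + 1) (k + 1) (r ++ (pred.drop s).take (k + 1 - s)) hdrop' (le_refl _)
        simpa using this
      · rw [if_neg hgt, if_neg hgt]
        have hku : ((k : Int) + 1) = ((k + 1 : Nat) : Int) := by omega
        rw [hku]
        have := ih (k + 1) (k + 1) (r ++ List.replicate (k + 1 - s) 0) hdrop' (le_refl _)
        simpa using this

-- ===== VERDICT (by name: the statement is the Claim_ definition above) =====
theorem detection_margine_spec : Claim_equal_detection_margine := by
  intro pred margine _
  unfold Spec_detection_margine detection_margine detection_margine_alt
  have := dm_main pred margine pred 0 0 [] (by simp) (le_refl 0)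
  simpa using this
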